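-- pv_equiv track=rewrite | github.com/ekant1999/Instructor-Assistant | modules/phase1-python/src/ia_phase1/tables.py | _next_indices_by_page
-- ===== SOURCE A (Python) =====
-- from typing import Any, Dict, Iterable, List, Optional, Tuple
--
-- def _safe_int(value: Any, default: int = 0) -> int:
--     try:
--         return int(value)
--     except (TypeError, ValueError):
--         return default
--
-- def _next_indices_by_page(text_blocks: Iterable[Dict[str, Any]]) -> Dict[int, int]:
--     max_by_page: Dict[int, int] = {}
--     for block in text_blocks:
--         page_no = _safe_int(block.get("page_no"), 0)
--         if page_no <= 0:
--             continue
--         idx = _safe_int(block.get("block_index"), 0)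
--         max_by_page[page_no] = max(max_by_page.get(page_no, -1), idx)
--     next_by_page: Dict[int, int] = {}
--     for page_no, max_idx in max_by_page.items():
--         next_by_page[page_no] = max_idx + 1000
--     return next_by_page
-- ===== SOURCE B (Python) =====
-- def _safe_int(value, default=0):
--     try:
--         return int(value)
--     except (TypeError, ValueError):
--         return default
--
-- def _next_indices_by_page(text_blocks):
--     pairs = [(_safe_int(b.get("page_no"), 0), _safe_int(b.get("block_index"), 0))
--              for b in text_blocks]
--     pairs = [(p, i) for (p, i) in pairs if p > 0]
--     pages = dict.fromkeys(p for (p, _) in pairs)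
--     return {p: max([-1] + [i for (q, i) in pairs if q == p]) + 1000 for p in pages}
-- ===== Notes on version B (the rewrite author's own statement) =====
-- stated objective: alternative
-- what changed: Replaces the streaming per-key running-max dict update with a materialize-filter pipeline: build (page,index) pairs, drop non-positive pages, dedup pages in first-occurrence order, then one per-page max reduction builds the result dict directly.
import Mathlib
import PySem

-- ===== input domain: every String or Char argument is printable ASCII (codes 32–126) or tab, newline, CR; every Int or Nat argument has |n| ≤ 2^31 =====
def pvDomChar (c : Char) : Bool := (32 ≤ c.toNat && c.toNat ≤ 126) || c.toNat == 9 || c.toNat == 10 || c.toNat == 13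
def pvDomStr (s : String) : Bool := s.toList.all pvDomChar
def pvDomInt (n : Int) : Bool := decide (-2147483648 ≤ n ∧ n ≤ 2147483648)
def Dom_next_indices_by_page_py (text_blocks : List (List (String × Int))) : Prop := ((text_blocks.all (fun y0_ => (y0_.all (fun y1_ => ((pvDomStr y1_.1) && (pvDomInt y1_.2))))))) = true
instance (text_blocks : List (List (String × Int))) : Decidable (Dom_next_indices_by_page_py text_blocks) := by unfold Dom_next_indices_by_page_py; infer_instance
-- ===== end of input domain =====

-- B replaces A's streaming running-max dict with materialize → filter → dedup pages → per-page max
-- reduction (objective: alternative decomposition; not faster).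

-- ===== PORT A =====
def next_indices_by_page_py (text_blocks : List (List (String × Int))) : List (Int × Int) :=
  let maxByPage := text_blocks.foldl (fun d block =>
    let page := (PySem.Dict.mk block).getD "page_no" 0
    if page ≤ 0 then d
    else d.insert page (max (d.getD page (-1)) ((PySem.Dict.mk block).getD "block_index" 0)))
    PySem.Dict.empty
  (maxByPage.items.foldl (fun d q => d.insert q.1 (q.2 + 1000)) PySem.Dict.empty).items

-- ===== PORT B =====
def next_indices_by_page_py_alt (text_blocks : List (List (String × Int))) : List (Int × Int) :=
  let pairs := (text_blocks.map (fun b =>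
      ((PySem.Dict.mk b).getD "page_no" 0, (PySem.Dict.mk b).getD "block_index" 0))).filter
    (fun q => decide (0 < q.1))
  let pages := PySem.List.dedup (pairs.map (·.1))
  pages.map (fun p =>
    (p, PySem.List.maxD ((-1 : Int) :: (pairs.filter (fun q => q.1 == p)).map (·.2)) (fun y => y) (-1) + 1000))

-- ===== PRECONDITION & SPEC =====
def Spec_next_indices_by_page_py (text_blocks : List (List (String × Int))) (out : List (Int × Int)) : Prop := out = next_indices_by_page_py_alt text_blocks
instance (text_blocks : List (List (String × Int))) (out : List (Int × Int)) : Decidable (Spec_next_indices_by_page_py text_blocks out) := by unfold Spec_next_indices_by_page_py; infer_instance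

-- ===== CLAIM (what is proved, stated in full; the proofs are below) =====
def Claim_equal_next_indices_by_page_py : Prop := ∀ (text_blocks : List (List (String × Int))), Dom_next_indices_by_page_py text_blocks → Spec_next_indices_by_page_py text_blocks (next_indices_by_page_py text_blocks)

-- ===== LEMMAS AND PROOFS =====

-- the body of A's first loop, on an already extracted (page, idx) pair
def pvStepMax (d : PySem.Dict Int Int) (q : Int × Int) : PySem.Dict Int Int :=
  d.insert q.1 (max (d.getD q.1 (-1)) q.2)

-- the per-page running max A maintains, as a reduction over the filtered pair list
def pvF (l : List (Int × Int)) (p : Int) : Int :=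
  ((l.filter (fun q => q.1 == p)).map (·.2)).foldl max (-1)

theorem pv_items_fold (l : List (Int × Int)) :
    (l.foldl pvStepMax PySem.Dict.empty).items
      = (PySem.Set.ofList (l.map (·.1))).map (fun p => (p, pvF l p)) := by
  induction l using List.reverseRecOn with
  | nil => rfl
  | append_singleton l q ih =>
    have hkeys : (l.foldl pvStepMax PySem.Dict.empty).keys
        = PySem.Set.ofList (l.map (·.1)) := by
      rw [PySem.Dict.keys, ih, List.map_map,
        show ((fun x : Int × Int => x.1) ∘ fun p : Int => (p, pvF l p)) = id from rfl,
        List.map_id]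
    have hnd : (PySem.Set.ofList (l.map (·.1))).Nodup := PySem.Set.nodup_ofList _
    have hof : PySem.Set.ofList ((l ++ [q]).map (·.1))
        = if q.1 ∈ PySem.Set.ofList (l.map (·.1)) then PySem.Set.ofList (l.map (·.1))
          else PySem.Set.ofList (l.map (·.1)) ++ [q.1] := by
      rw [PySem.Set.ofList_eq_foldl, List.map_append, List.foldl_append]
      rw [← PySem.Set.ofList_eq_foldl]
      by_cases hm : q.1 ∈ PySem.Set.ofList (l.map (·.1)) <;>
        simp [PySem.Set.add, PySem.Set.contains, hm]
    have hFsame : ∀ p : Int, p ≠ q.1 → pvF (l ++ [q]) p = pvF l p := by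
      intro p hp
      simp [pvF, List.filter_append, Ne.symm hp]
    have hFq : pvF (l ++ [q]) q.1 = max (pvF l q.1) q.2 := by
      simp [pvF, List.filter_append, List.foldl_append]
    rw [List.foldl_append]
    simp only [List.foldl_cons, List.foldl_nil]
    by_cases hmem : q.1 ∈ PySem.Set.ofList (l.map (·.1))
    · have hcont : (l.foldl pvStepMax PySem.Dict.empty).contains q.1 = true := by
        rw [PySem.Dict.contains_eq_decide_mem_keys, hkeys]; simpa using hmem
      have hgetD : (l.foldl pvStepMax PySem.Dict.empty).getD q.1 (-1) = pvF l q.1 := by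
        apply PySem.Dict.getD_of_mem_items
        · rw [ih]; exact List.mem_map_of_mem hmem
        · rw [hkeys]; exact hnd
      show (PySem.Dict.insert _ _ _).items = _
      rw [PySem.Dict.items_insert_of_contains _ _ hcont, hgetD, ih, hof, if_pos hmem,
        List.map_map]
      apply List.map_congr_left
      intro p hp
      by_cases hpq : p = q.1
      · subst hpq; simp [hFq]
      · simp [hpq, hFsame p hpq]
    · have hcont : (l.foldl pvStepMax PySem.Dict.empty).contains q.1 = false := by
        rw [PySem.Dict.contains_eq_decide_mem_keys, hkeys]; simpa using hmem
      have hgetD : (l.foldl pvStepMax PySem.Dict.empty).getD q.1 (-1) = -1 :=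
        PySem.Dict.getD_of_not_contains _ _ hcont
      have hq1 : q.1 ∉ l.map (·.1) := by simpa [PySem.Set.mem_ofList] using hmem
      have hfilt : l.filter (fun r => r.1 == q.1) = [] := by
        rw [List.filter_eq_nil_iff]
        intro r hr
        simp only [beq_iff_eq]
        intro hrq
        exact hq1 (hrq ▸ List.mem_map_of_mem hr)
      show (PySem.Dict.insert _ _ _).items = _
      rw [PySem.Dict.items_insert_of_not_contains _ _ hcont, hgetD, ih, hof, if_neg hmem,
        List.map_append]
      congr 1
      · apply List.map_congr_left
        intro p hp
        have hpq : p ≠ q.1 := fun h => hmem (h ▸ hp)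
        simp [hFsame p hpq]
      · simp [pvF, List.filter_append, hfilt]

-- ===== VERDICT (by name: the statement is the Claim_ definition above) =====
theorem next_indices_by_page_py_spec : Claim_equal_next_indices_by_page_py := by
  intro text_blocks _
  unfold Spec_next_indices_by_page_py next_indices_by_page_py next_indices_by_page_py_alt
  set g : List (String × Int) → Int × Int := fun b =>
    ((PySem.Dict.mk b).getD "page_no" 0, (PySem.Dict.mk b).getD "block_index" 0) with hg
  have hbody : text_blocks.foldl (fun d block =>
      let page := (PySem.Dict.mk block).getD "page_no" 0
      if page ≤ 0 then d
      else d.insert page (max (d.getD page (-1)) ((PySem.Dict.mk block).getD "block_index" 0)))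
      PySem.Dict.empty
      = ((text_blocks.map g).filter (fun q => decide (0 < q.1))).foldl pvStepMax PySem.Dict.empty := by
    rw [← PySem.List.foldl_ite_eq_foldl_filter (p := fun q : Int × Int => 0 < q.1) pvStepMax,
      List.foldl_map]
    apply PySem.List.foldl_congr_mem
    intro d b _
    simp only [hg, pvStepMax]
    by_cases h : (PySem.Dict.mk b).getD "page_no" 0 ≤ 0
    · rw [if_pos h, if_neg (by omega)]
    · rw [if_neg h, if_pos (by omega)]
  rw [hbody]
  set fp := (text_blocks.map g).filter (fun q => decide (0 < q.1)) with hfp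
  have hitems := pv_items_fold fp
  have hnd : ((fp.foldl pvStepMax PySem.Dict.empty).items.map (·.1)).Nodup := by
    rw [hitems, List.map_map,
      show ((fun x : Int × Int => x.1) ∘ fun p : Int => (p, pvF fp p)) = id from rfl,
      List.map_id]
    exact PySem.Set.nodup_ofList (fp.map (·.1))
  rw [PySem.Dict.items_foldl_insert_fresh _ (fun q : Int × Int => q.1)
    (fun q : Int × Int => q.2 + 1000) PySem.Dict.empty
    (fun a _ => PySem.Dict.contains_empty _) hnd]
  rw [hitems]
  simp only [PySem.Dict.empty, List.nil_append, List.map_map, PySem.List.dedup]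
  apply List.map_congr_left
  intro p _
  simp only [Function.comp]
  congr 1
  rw [PySem.List.maxD]
  rw [PySem.List.max?_id_cons]
  simp [pvF]
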